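-- pv_equiv track=rewrite | github.com/tedeyang/Agent-First-Organization | arklex/orchestrator/generator/formatting/graph_validator.py | _validate_connectivity
-- ===== SOURCE A (Python) =====
-- from typing import Dict, Any, List, Set, Optional
--
-- def _validate_connectivity(graph: Dict[str, Any]) -> bool:
--     """Validate graph connectivity.
--
--     Args:
--         graph (Dict[str, Any]): The graph to validate
--
--     Returns:
--         bool: True if graph is connected
--     """
--     nodes = graph.get("nodes", [])
--     edges = graph.get("edges", [])
--
--     # Create node set
--     node_ids = {node.get("id", "") for node in nodes}
--
--     # Create adjacency list
--     adjacency = {node_id: set() for node_id in node_ids}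
--     for edge in edges:
--         source = edge.get("source", "")
--         target = edge.get("target", "")
--         if source in node_ids and target in node_ids:
--             adjacency[source].add(target)
--
--     # Check for isolated nodes
--     for node_id in node_ids:
--         if not adjacency[node_id] and not any(
--             node_id in adj for adj in adjacency.values()
--         ):
--             return False
--
--     # Check for cycles
--     visited = set()
--     path = set()
--
--     def has_cycle(node_id: str) -> bool:
--         visited.add(node_id)
--         path.add(node_id)
--
--         for neighbor in adjacency[node_id]:
--             if neighbor not in visited:
--                 if has_cycle(neighbor):
--                     return True
--             elif neighbor in path:
--                 return True
--
--         path.remove(node_id)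
--         return False
--
--     for node_id in node_ids:
--         if node_id not in visited:
--             if has_cycle(node_id):
--                 return False
--
--     return True
-- ===== SOURCE B (Python) =====
-- from typing import Dict, Any
--
--
-- def _validate_connectivity(graph: Dict[str, Any]) -> bool:
--     """Validate graph connectivity: no isolated nodes, no cycles.
--
--     Same construction of the node set and deduplicated adjacency as before,
--     then a single linear pass collects every non-isolated node, and layered
--     topological peeling (Kahn-style) replaces the recursive DFS: repeatedly
--     remove the nodes with no predecessor among the remaining ones; a cycle
--     is exactly a non-empty remainder that yields no removable node.
--     """
--     nodes = graph.get("nodes", [])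
--     edges = graph.get("edges", [])
--
--     node_ids = {node.get("id", "") for node in nodes}
--
--     adjacency = {node_id: set() for node_id in node_ids}
--     for edge in edges:
--         source = edge.get("source", "")
--         target = edge.get("target", "")
--         if source in node_ids and target in node_ids:
--             adjacency[source].add(target)
--
--     # A node is non-isolated iff it is an endpoint of some kept edge.
--     non_isolated = set()
--     for src, targets in adjacency.items():
--         if targets:
--             non_isolated.add(src)
--             non_isolated.update(targets)
--     if node_ids - non_isolated:
--         return False
--
--     # Layered topological peeling: acyclic iff everything can be peeled.
--     remaining = set(node_ids)
--     while remaining: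
--         sources = {
--             v
--             for v in remaining
--             if not any(v in adjacency[u] for u in remaining)
--         }
--         if not sources:
--             return False
--         remaining -= sources
--     return True
-- ===== Notes on version B (the rewrite author's own statement) =====
-- stated objective: alternative
-- what changed: The recursive three-colour DFS cycle check is replaced by layered Kahn-style topological peeling (repeatedly delete the nodes with no remaining predecessor; a non-empty unpeelable remainder is a cycle), and the per-node any()-scan isolated-node check is replaced by one pass that collects the set of non-isolated nodes.
import Mathlib
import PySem

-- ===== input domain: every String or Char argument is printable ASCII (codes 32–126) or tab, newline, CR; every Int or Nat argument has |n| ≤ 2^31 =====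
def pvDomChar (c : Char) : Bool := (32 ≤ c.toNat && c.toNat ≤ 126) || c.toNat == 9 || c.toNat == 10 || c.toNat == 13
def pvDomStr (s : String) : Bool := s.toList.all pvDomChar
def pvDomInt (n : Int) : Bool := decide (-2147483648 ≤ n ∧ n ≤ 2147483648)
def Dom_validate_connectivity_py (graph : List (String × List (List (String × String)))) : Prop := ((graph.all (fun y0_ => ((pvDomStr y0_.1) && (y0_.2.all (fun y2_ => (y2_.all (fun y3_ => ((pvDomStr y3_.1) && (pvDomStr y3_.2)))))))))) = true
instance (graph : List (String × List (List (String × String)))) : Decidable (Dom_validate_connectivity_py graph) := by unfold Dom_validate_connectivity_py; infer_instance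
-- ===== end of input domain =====

-- B replaces the recursive DFS cycle check by layered topological peeling and the per-node
-- any()-scan isolated-node check by one pass collecting the non-isolated nodes (alternative
-- decomposition, not claimed faster).

-- ===== PORT A =====
-- for node_id in node_ids: if not adjacency[node_id] and not any(...): return False
def pvIsoLoop (adj : PySem.Dict String (PySem.Set String)) : List String → Bool
  | [] => false
  | v :: rest =>
    if (PySem.Dict.getD adj v PySem.Set.empty).isEmpty &&
       !((PySem.Dict.values adj).any (fun s => PySem.Set.contains s v)) then true
    else pvIsoLoop adj rest

-- has_cycle(node): visited/path are Python's mutated sets; the second component is the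
-- visited set at return (path is restored on a False return, so it is threaded as a parameter).
-- fuel (|node_ids|+1 at the top call) bounds the real recursion depth; the 0 arm is never reached.
mutual
def pvHasCycle (adj : PySem.Dict String (PySem.Set String)) :
    Nat → String → PySem.Set String → PySem.Set String → Bool × PySem.Set String
  | 0, _, visited, _ => (false, visited)
  | fuel+1, node, visited, path =>
      pvNbLoop adj fuel (PySem.Dict.getD adj node PySem.Set.empty)
        (PySem.Set.add visited node) (PySem.Set.add path node)
  termination_by fuel _ _ _ => (fuel, 0)
def pvNbLoop (adj : PySem.Dict String (PySem.Set String)) :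
    Nat → List String → PySem.Set String → PySem.Set String → Bool × PySem.Set String
  | _, [], visited, _ => (false, visited)
  | fuel, n :: rest, visited, path =>
      if !(PySem.Set.contains visited n) then
        match pvHasCycle adj fuel n visited path with
        | (true, v') => (true, v')
        | (false, v') => pvNbLoop adj fuel rest v' path
      else if PySem.Set.contains path n then (true, visited)
      else pvNbLoop adj fuel rest visited path
  termination_by fuel l _ _ => (fuel, l.length + 1)
end

-- for node_id in node_ids: if node_id not in visited: if has_cycle(node_id): return False
def pvCycleLoop (adj : PySem.Dict String (PySem.Set String)) (fuel : Nat) :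
    List String → PySem.Set String → Bool
  | [], _ => true
  | v :: rest, visited =>
      if !(PySem.Set.contains visited v) then
        match pvHasCycle adj fuel v visited PySem.Set.empty with
        | (true, _) => false
        | (false, v') => pvCycleLoop adj fuel rest v'
      else pvCycleLoop adj fuel rest visited

def validate_connectivity_py (graph : List (String × List (List (String × String)))) : Bool :=
  let nodes := PySem.Dict.getD (PySem.Dict.mk graph) "nodes" []
  let edges := PySem.Dict.getD (PySem.Dict.mk graph) "edges" []
  let node_ids : PySem.Set String :=
    PySem.Set.ofList (nodes.map (fun node => PySem.Dict.getD (PySem.Dict.mk node) "id" ""))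
  let adjacency : PySem.Dict String (PySem.Set String) :=
    node_ids.foldl (fun d v => d.insert v PySem.Set.empty) PySem.Dict.empty
  let adjacency := edges.foldl (fun d edge =>
      let source := PySem.Dict.getD (PySem.Dict.mk edge) "source" ""
      let target := PySem.Dict.getD (PySem.Dict.mk edge) "target" ""
      if PySem.Set.contains node_ids source && PySem.Set.contains node_ids target then
        d.modify source PySem.Set.empty (fun s => PySem.Set.add s target)
      else d) adjacency
  if pvIsoLoop adjacency node_ids then false
  else pvCycleLoop adjacency (node_ids.length + 1) node_ids PySem.Set.empty

-- ===== PORT B =====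
-- while remaining: peel the nodes with no predecessor among remaining.
-- fuel (|node_ids|+1 at the top call) bounds the number of rounds; the 0 arm is never reached.
def pvPeel (adj : PySem.Dict String (PySem.Set String)) : Nat → PySem.Set String → Bool
  | _, [] => true
  | 0, _ => false
  | fuel+1, remaining =>
      let sources := remaining.filter (fun v =>
        !(remaining.any (fun u => PySem.Set.contains (PySem.Dict.getD adj u PySem.Set.empty) v)))
      if sources.isEmpty then false
      else pvPeel adj fuel (PySem.Set.diff remaining sources)

def validate_connectivity_py_alt (graph : List (String × List (List (String × String)))) : Bool :=
  let nodes := PySem.Dict.getD (PySem.Dict.mk graph) "nodes" []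
  let edges := PySem.Dict.getD (PySem.Dict.mk graph) "edges" []
  let node_ids : PySem.Set String :=
    PySem.Set.ofList (nodes.map (fun node => PySem.Dict.getD (PySem.Dict.mk node) "id" ""))
  let adjacency : PySem.Dict String (PySem.Set String) :=
    node_ids.foldl (fun d v => d.insert v PySem.Set.empty) PySem.Dict.empty
  let adjacency := edges.foldl (fun d edge =>
      let source := PySem.Dict.getD (PySem.Dict.mk edge) "source" ""
      let target := PySem.Dict.getD (PySem.Dict.mk edge) "target" ""
      if PySem.Set.contains node_ids source && PySem.Set.contains node_ids target then
        d.modify source PySem.Set.empty (fun s => PySem.Set.add s target)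
      else d) adjacency
  let non_isolated := (PySem.Dict.items adjacency).foldl (fun acc p =>
      if p.2.isEmpty then acc else PySem.Set.update (PySem.Set.add acc p.1) p.2) PySem.Set.empty
  if !(PySem.Set.diff node_ids non_isolated).isEmpty then false
  else pvPeel adjacency (node_ids.length + 1) node_ids

-- ===== PRECONDITION & SPEC =====
def Spec_validate_connectivity_py (graph : List (String × List (List (String × String)))) (out : Bool) : Prop := out = validate_connectivity_py_alt graph
instance (graph : List (String × List (List (String × String)))) (out : Bool) : Decidable (Spec_validate_connectivity_py graph out) := by unfold Spec_validate_connectivity_py; infer_instance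

-- ===== CLAIM (what is proved, stated in full; the proofs are below) =====
def Claim_equal_validate_connectivity_py : Prop := ∀ (graph : List (String × List (List (String × String)))), Dom_validate_connectivity_py graph → Spec_validate_connectivity_py graph (validate_connectivity_py graph)

-- ===== LEMMAS AND PROOFS =====

-- the edge relation of the constructed adjacency dict
def pvStep (adj : PySem.Dict String (PySem.Set String)) (a b : String) : Prop :=
  b ∈ PySem.Dict.getD adj a PySem.Set.empty

-- the edge relation restricted to a set R of nodes
def pvStepIn (adj : PySem.Dict String (PySem.Set String)) (R : List String) (a b : String) : Prop :=
  a ∈ R ∧ b ∈ R ∧ pvStep adj a b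

-- "no cycle is reachable from v"
def pvNRC (adj : PySem.Dict String (PySem.Set String)) (v : String) : Prop :=
  ¬ ∃ w, Relation.ReflTransGen (pvStep adj) v w ∧ Relation.TransGen (pvStep adj) w w

theorem pv_contains (s : PySem.Set String) (x : String) : PySem.Set.contains s x = decide (x ∈ s) := by
  simp [PySem.Set.contains]

theorem pv_restrict {r : String → String → Prop} {p : String → Prop}
    (hp : ∀ x y, r x y → p y) {a b : String} (h : Relation.TransGen r a b) :
    p a → Relation.TransGen (fun x y => r x y ∧ p x ∧ p y) a b := by
  induction h using Relation.TransGen.head_induction_on with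
  | single h => exact fun pa => Relation.TransGen.single ⟨h, pa, hp _ _ h⟩
  | head h h' ih => exact fun pa => Relation.TransGen.head ⟨h, pa, hp _ _ h⟩ (ih (hp _ _ h))

theorem pv_cycle_target {r : String → String → Prop} {a : String}
    (h : Relation.TransGen r a a) : ∃ c, r c a := by
  obtain ⟨b, -, hb⟩ := Relation.TransGen.tail'_iff.mp h
  exact ⟨b, hb⟩

theorem pv_serial_cycle (adj : PySem.Dict String (PySem.Set String)) (R : List String)
    (hne : R ≠ []) (hser : ∀ v ∈ R, ∃ u ∈ R, pvStep adj u v) :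
    ∃ v, Relation.TransGen (pvStepIn adj R) v v := by
  by_contra hno
  rw [not_exists] at hno
  haveI : Finite {x // x ∈ R} := (List.finite_toSet R).to_subtype
  let q : {x // x ∈ R} → {x // x ∈ R} → Prop :=
    fun a b => Relation.TransGen (pvStepIn adj R) a.1 b.1
  haveI : IsTrans {x // x ∈ R} q := ⟨fun _ _ _ hab hbc => hab.trans hbc⟩
  haveI : Std.Irrefl q := ⟨fun a => hno a.1⟩
  have wf := Finite.wellFounded_of_trans_of_irrefl q
  obtain ⟨x0, hx0⟩ := List.exists_mem_of_ne_nil R hne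
  obtain ⟨m, -, hmin⟩ := wf.has_min Set.univ ⟨⟨x0, hx0⟩, trivial⟩
  obtain ⟨u, hu, hstep⟩ := hser m.1 m.2
  exact hmin ⟨u, hu⟩ trivial (Relation.TransGen.single ⟨hu, m.2, hstep⟩)

theorem pv_nrc_step (adj : PySem.Dict String (PySem.Set String)) (node : String)
    (h : ∀ n, pvStep adj node n → pvNRC adj n) : pvNRC adj node := by
  rintro ⟨w, hreach, hcyc⟩
  rcases Relation.ReflTransGen.cases_head hreach with heq | ⟨c, hstep, hrt⟩
  · cases heq
    obtain ⟨c, hc, hcr⟩ := Relation.TransGen.head'_iff.mp hcyc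
    exact h c hc ⟨node, hcr, hcyc⟩
  · exact h c hstep ⟨w, hrt, hcyc⟩

theorem pv_filter_lt (l : List String) (p : String → Bool) (x : String)
    (hx : x ∈ l) (hp : p x = false) : (l.filter p).length < l.length := by
  induction l with
  | nil => cases hx
  | cons a t ih =>
    rcases List.mem_cons.mp hx with rfl | hxt
    · simp only [List.filter_cons, hp]
      exact Nat.lt_succ_of_le (List.length_filter_le p t)
    · by_cases ha : p a
      · simpa [List.filter_cons, ha] using Nat.succ_lt_succ (ih hxt)
      · simp only [List.filter_cons, Bool.not_eq_true] at *
        simp only [ha]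
        exact Nat.lt_succ_of_lt (ih hxt)

-- the DFS specification, packaged for the mutual induction on fuel
def pvHCstat (adj : PySem.Dict String (PySem.Set String)) (nids : List String) (fuel : Nat) : Prop :=
  ∀ node visited path, node ∈ nids → (∀ x ∈ visited, x ∈ nids) → visited.Nodup →
    (∀ x ∈ path, x ∈ visited) → node ∉ visited →
    (∀ v ∈ visited, v ∉ path → pvNRC adj v) →
    (∀ p ∈ path, Relation.ReflTransGen (pvStep adj) p node) →
    nids.length < fuel + visited.length →
    (∀ x ∈ visited, x ∈ (pvHasCycle adj fuel node visited path).2) ∧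
    node ∈ (pvHasCycle adj fuel node visited path).2 ∧
    (∀ x ∈ (pvHasCycle adj fuel node visited path).2, x ∈ nids) ∧
    (pvHasCycle adj fuel node visited path).2.Nodup ∧
    ((pvHasCycle adj fuel node visited path).1 = true → ∃ v, Relation.TransGen (pvStep adj) v v) ∧
    ((pvHasCycle adj fuel node visited path).1 = false →
      ∀ v ∈ (pvHasCycle adj fuel node visited path).2, v ∉ path → pvNRC adj v)

def pvNBstat (adj : PySem.Dict String (PySem.Set String)) (nids : List String) (fuel : Nat) : Prop :=
  ∀ node (l : List String) visited path,
    (∀ n ∈ l, pvStep adj node n) → node ∈ path →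
    (∀ x ∈ path, x ∈ visited) → (∀ x ∈ visited, x ∈ nids) → visited.Nodup →
    (∀ v ∈ visited, v ∉ path → pvNRC adj v) →
    (∀ p ∈ path, Relation.ReflTransGen (pvStep adj) p node) →
    nids.length < fuel + visited.length →
    (∀ x ∈ visited, x ∈ (pvNbLoop adj fuel l visited path).2) ∧
    (∀ x ∈ (pvNbLoop adj fuel l visited path).2, x ∈ nids) ∧
    (pvNbLoop adj fuel l visited path).2.Nodup ∧
    ((pvNbLoop adj fuel l visited path).1 = true → ∃ v, Relation.TransGen (pvStep adj) v v) ∧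
    ((pvNbLoop adj fuel l visited path).1 = false →
      (∀ v ∈ (pvNbLoop adj fuel l visited path).2, v ∉ path → pvNRC adj v) ∧ ∀ n ∈ l, pvNRC adj n)

theorem pvHC_zero (adj : PySem.Dict String (PySem.Set String)) (nids : List String) :
    pvHCstat adj nids 0 := by
  intro node visited path _ hv hvnd _ _ _ _ hfuel
  have := (List.Nodup.subperm hvnd hv).length_le
  omega

theorem pvNB_of_HC (adj : PySem.Dict String (PySem.Set String)) (nids : List String)
    (hclosed : ∀ a b, pvStep adj a b → a ∈ nids ∧ b ∈ nids) (fuel : Nat)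
    (hhc : pvHCstat adj nids fuel) : pvNBstat adj nids fuel := by
  intro node l
  induction l with
  | nil =>
    intro visited path _ _ _ hv hvnd hinv _ _
    simp only [pvNbLoop]
    exact ⟨fun x hx => hx, hv, hvnd, by simp, fun _ => ⟨hinv, by simp⟩⟩
  | cons n rest ih =>
    intro visited path hl hnp hpv hv hvnd hinv hpath hfuel
    have hstep_n : pvStep adj node n := hl n (by simp)
    have hnn : n ∈ nids := (hclosed node n hstep_n).2
    simp only [pvNbLoop, pv_contains]
    by_cases hnv : n ∈ visited
    · by_cases hnp' : n ∈ path
      · simp only [hnv, hnp', decide_true, Bool.not_true, Bool.false_eq_true, if_false, if_true]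
        exact ⟨fun x hx => hx, hv, hvnd,
          fun _ => ⟨n, Relation.TransGen.tail' (hpath n hnp') hstep_n⟩, by simp⟩
      · simp only [hnv, hnp', decide_true, decide_false, Bool.not_true, Bool.false_eq_true,
          if_false]
        obtain ⟨c1, c2, c3, c4, c5⟩ := ih visited path (fun m hm => hl m (by simp [hm])) hnp
          hpv hv hvnd hinv hpath hfuel
        refine ⟨c1, c2, c3, c4, fun hf => ⟨(c5 hf).1, fun m hm => ?_⟩⟩
        rcases List.mem_cons.mp hm with rfl | hm
        · exact hinv m hnv hnp'
        · exact (c5 hf).2 m hm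
    · simp only [hnv, decide_false, Bool.not_false, if_true]
      have hhcres := hhc n visited path hnn hv hvnd hpv hnv hinv
        (fun p hp => Relation.ReflTransGen.tail (hpath p hp) hstep_n) hfuel
      rcases hres : pvHasCycle adj fuel n visited path with ⟨b, V⟩
      rw [hres] at hhcres
      obtain ⟨hc1, hc2, hc3, hc4, hc5, hc6⟩ := hhcres
      cases b with
      | true =>
        exact ⟨hc1, hc3, hc4, fun _ => hc5 rfl, by simp⟩
      | false =>
        have hinv2 : ∀ v ∈ V, v ∉ path → pvNRC adj v := hc6 rfl
        have hfuel2 : nids.length < fuel + V.length := by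
          have hVle : visited.length ≤ V.length :=
            (List.Nodup.subperm hvnd (fun x hx => hc1 x hx)).length_le
          omega
        obtain ⟨c1, c2, c3, c4, c5⟩ := ih V path (fun m hm => hl m (by simp [hm])) hnp
          (fun x hx => hc1 x (hpv x hx)) hc3 hc4 hinv2 hpath hfuel2
        refine ⟨fun x hx => c1 x (hc1 x hx), c2, c3, c4, fun hf => ?_⟩
        obtain ⟨d1, d2⟩ := c5 hf
        refine ⟨d1, fun m hm => ?_⟩
        rcases List.mem_cons.mp hm with rfl | hm
        · exact d1 m (c1 m hc2) (fun h => hnv (hpv m h))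
        · exact d2 m hm

theorem pvHC_succ (adj : PySem.Dict String (PySem.Set String)) (nids : List String)
    (fuel : Nat) (hnb : pvNBstat adj nids fuel) : pvHCstat adj nids (fuel + 1) := by
  intro node visited path hn hv hvnd hpv hnv hinv hpath hfuel
  simp only [pvHasCycle]
  have hlen1 : (PySem.Set.add visited node).length = visited.length + 1 := by
    rw [PySem.Set.add_of_not_mem hnv, List.length_append, List.length_cons, List.length_nil]
  obtain ⟨c1, c2, c3, c4, c5⟩ := hnb node (PySem.Dict.getD adj node PySem.Set.empty)
    (PySem.Set.add visited node) (PySem.Set.add path node)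
    (fun _ hm => hm)
    ((PySem.Set.mem_add path node node).mpr (Or.inr rfl))
    (fun x hx => by
      rcases (PySem.Set.mem_add path node x).mp hx with h | h2
      · exact (PySem.Set.mem_add visited node x).mpr (Or.inl (hpv x h))
      · exact (PySem.Set.mem_add visited node x).mpr (Or.inr h2))
    (fun x hx => by
      rcases (PySem.Set.mem_add visited node x).mp hx with h | h2
      · exact hv x h
      · exact h2 ▸ hn)
    (PySem.Set.nodup_add visited node hvnd)
    (fun v hv2 hnp2 => by
      rcases (PySem.Set.mem_add visited node v).mp hv2 with h | h2
      · exact hinv v h (fun hp => hnp2 ((PySem.Set.mem_add path node v).mpr (Or.inl hp)))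
      · exact absurd ((PySem.Set.mem_add path node v).mpr (Or.inr h2)) hnp2)
    (fun p hp => by
      rcases (PySem.Set.mem_add path node p).mp hp with h | h2
      · exact hpath p h
      · exact h2 ▸ Relation.ReflTransGen.refl)
    (by omega)
  refine ⟨fun x hx => c1 x ((PySem.Set.mem_add visited node x).mpr (Or.inl hx)),
    c1 node ((PySem.Set.mem_add visited node node).mpr (Or.inr rfl)), c2, c3, c4,
    fun hf v hv2 hvp => ?_⟩
  obtain ⟨d1, d2⟩ := c5 hf
  by_cases hveq : v = node
  · exact hveq ▸ pv_nrc_step adj node (fun m hm => d2 m hm)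
  · exact d1 v hv2 (fun h => by
      rcases (PySem.Set.mem_add path node v).mp h with h2 | h2
      · exact hvp h2
      · exact hveq h2)

theorem pvHC_all (adj : PySem.Dict String (PySem.Set String)) (nids : List String)
    (hclosed : ∀ a b, pvStep adj a b → a ∈ nids ∧ b ∈ nids)
    (fuel : Nat) : pvHCstat adj nids fuel := by
  induction fuel with
  | zero => exact pvHC_zero adj nids
  | succ fuel ih => exact pvHC_succ adj nids fuel (pvNB_of_HC adj nids hclosed fuel ih)

theorem pvCL_spec (adj : PySem.Dict String (PySem.Set String)) (nids : List String)
    (hhc : pvHCstat adj nids (nids.length + 1)) (l : List String) :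
    ∀ visited : PySem.Set String,
    (∀ x ∈ l, x ∈ nids) → (∀ x ∈ visited, x ∈ nids) → visited.Nodup →
    (∀ v ∈ visited, pvNRC adj v) →
    (pvCycleLoop adj (nids.length + 1) l visited = false →
      ∃ v, Relation.TransGen (pvStep adj) v v) ∧
    (pvCycleLoop adj (nids.length + 1) l visited = true →
      ∀ v, v ∈ l ∨ v ∈ visited → pvNRC adj v) := by
  induction l with
  | nil =>
    intro visited _ _ _ hinv
    simp only [pvCycleLoop]
    refine ⟨by simp, fun _ v hv2 => ?_⟩
    rcases hv2 with h | h
    · cases h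
    · exact hinv v h
  | cons n rest ih =>
    intro visited hl hv hvnd hinv
    simp only [pvCycleLoop, pv_contains]
    by_cases hnv : n ∈ visited
    · simp only [hnv, decide_true, Bool.not_true, Bool.false_eq_true, if_false]
      obtain ⟨c1, c2⟩ := ih visited (fun x hx => hl x (by simp [hx])) hv hvnd hinv
      refine ⟨c1, fun ht v hv2 => ?_⟩
      rcases hv2 with h | h
      · rcases List.mem_cons.mp h with rfl | h2
        · exact hinv v hnv
        · exact c2 ht v (Or.inl h2)
      · exact c2 ht v (Or.inr h)
    · simp only [hnv, decide_false, Bool.not_false, if_true]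
      have hres := hhc n visited PySem.Set.empty (hl n (by simp)) hv hvnd
        (by intro x hx; cases hx) hnv (fun v hv2 _ => hinv v hv2)
        (by intro p hp; cases hp) (by omega)
      rcases hres2 : pvHasCycle adj (nids.length + 1) n visited PySem.Set.empty with ⟨b, V⟩
      rw [hres2] at hres
      obtain ⟨hc1, hc2, hc3, hc4, hc5, hc6⟩ := hres
      cases b with
      | true => exact ⟨fun _ => hc5 rfl, by simp⟩
      | false =>
        have hinvV : ∀ v ∈ V, pvNRC adj v := fun v hv2 => hc6 rfl v hv2 (by intro h; cases h)
        obtain ⟨c1, c2⟩ := ih V (fun x hx => hl x (by simp [hx])) hc3 hc4 hinvV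
        refine ⟨c1, fun ht v hv2 => ?_⟩
        rcases hv2 with h | h
        · rcases List.mem_cons.mp h with rfl | h2
          · exact hinvV v hc2
          · exact c2 ht v (Or.inl h2)
        · exact hinvV v (hc1 v h)

theorem pvA_cycle (adj : PySem.Dict String (PySem.Set String)) (nids : List String)
    (hclosed : ∀ a b, pvStep adj a b → a ∈ nids ∧ b ∈ nids) :
    pvCycleLoop adj (nids.length + 1) nids PySem.Set.empty = true ↔
      ∀ v, ¬ Relation.TransGen (pvStep adj) v v := by
  have hcl := pvCL_spec adj nids (pvHC_all adj nids hclosed (nids.length + 1)) nids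
    PySem.Set.empty (fun x hx => hx) (by intro x hx; cases hx) List.nodup_nil
    (by intro v hv; cases hv)
  constructor
  · intro htrue v hcyc
    obtain ⟨c, hc, -⟩ := Relation.TransGen.head'_iff.mp hcyc
    have hvn : v ∈ nids := (hclosed v c hc).1
    exact hcl.2 htrue v (Or.inl hvn) ⟨v, Relation.ReflTransGen.refl, hcyc⟩
  · intro hac
    cases hres : pvCycleLoop adj (nids.length + 1) nids PySem.Set.empty with
    | true => rfl
    | false =>
      obtain ⟨v, hv⟩ := hcl.1 hres
      exact absurd hv (hac v)

theorem pvPeel_iff (adj : PySem.Dict String (PySem.Set String)) :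
    ∀ fuel (R : PySem.Set String), R.Nodup → R.length < fuel →
    (pvPeel adj fuel R = true ↔ ¬ ∃ v, Relation.TransGen (pvStepIn adj R) v v) := by
  intro fuel
  induction fuel with
  | zero => intro R _ h; omega
  | succ fuel ih =>
    intro R hnd hlen
    cases R with
    | nil =>
      simp only [pvPeel, true_iff]
      rintro ⟨v, hv⟩
      obtain ⟨c, hc⟩ := pv_cycle_target hv
      cases hc.1
    | cons r rest =>
      simp only [pvPeel]
      by_cases hS : (List.filter (fun v =>
          !((r :: rest).any fun u => PySem.Set.contains (PySem.Dict.getD adj u PySem.Set.empty) v))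
          (r :: rest)).isEmpty = true
      · rw [if_pos hS]
        simp only [Bool.false_eq_true, false_iff, not_not]
        have hSnil := List.isEmpty_iff.mp hS
        have hser : ∀ v ∈ r :: rest, ∃ u ∈ r :: rest, pvStep adj u v := by
          intro v hv
          by_cases hpred : (!((r :: rest).any fun u =>
              PySem.Set.contains (PySem.Dict.getD adj u PySem.Set.empty) v)) = true
          · have hvS : v ∈ List.filter (fun v => !((r :: rest).any fun u =>
                PySem.Set.contains (PySem.Dict.getD adj u PySem.Set.empty) v)) (r :: rest) :=
              List.mem_filter.mpr ⟨hv, hpred⟩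
            rw [hSnil] at hvS
            cases hvS
          · simp only [Bool.not_eq_true', Bool.not_eq_false, List.any_eq_true,
              pv_contains, decide_eq_true_eq] at hpred
            obtain ⟨u, hu, hmem⟩ := hpred
            exact ⟨u, hu, hmem⟩
        exact pv_serial_cycle adj (r :: rest) (by simp) hser
      · rw [if_neg hS]
        have hsub : ∀ x ∈ PySem.Set.diff (r :: rest) (List.filter (fun v =>
            !((r :: rest).any fun u =>
              PySem.Set.contains (PySem.Dict.getD adj u PySem.Set.empty) v)) (r :: rest)),
            x ∈ r :: rest := fun x hx => ((PySem.Set.mem_diff _ _ x).mp hx).1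
        have hnd2 : (PySem.Set.diff (r :: rest) (List.filter (fun v =>
            !((r :: rest).any fun u =>
              PySem.Set.contains (PySem.Dict.getD adj u PySem.Set.empty) v)) (r :: rest))).Nodup := by
          simp only [PySem.Set.diff]
          exact List.Nodup.filter _ hnd
        have hlt : (PySem.Set.diff (r :: rest) (List.filter (fun v =>
            !((r :: rest).any fun u =>
              PySem.Set.contains (PySem.Dict.getD adj u PySem.Set.empty) v)) (r :: rest))).length <
            (r :: rest).length := by
          obtain ⟨s, hs⟩ := List.exists_mem_of_ne_nil (List.filter (fun v =>
              !((r :: rest).any fun u =>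
                PySem.Set.contains (PySem.Dict.getD adj u PySem.Set.empty) v)) (r :: rest))
            (fun h => hS (by rw [h]; rfl))
          have hsR : s ∈ r :: rest := (List.mem_filter.mp hs).1
          have hcont : (!(PySem.Set.contains (List.filter (fun v =>
              !((r :: rest).any fun u =>
                PySem.Set.contains (PySem.Dict.getD adj u PySem.Set.empty) v)) (r :: rest)) s)) = false := by
            rw [pv_contains]
            simp only [Bool.not_eq_false', decide_eq_true_eq]
            exact hs
          simp only [PySem.Set.diff]
          exact pv_filter_lt (r :: rest) _ s hsR hcont
        rw [ih _ hnd2 (by omega)]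
        -- the two cycle statements are equivalent
        constructor
        · intro hno ⟨v, hv⟩
          -- restrict the cycle in R to R'
          have hp : ∀ x y, pvStepIn adj (r :: rest) x y →
              y ∈ PySem.Set.diff (r :: rest) (List.filter (fun v =>
                !((r :: rest).any fun u =>
                  PySem.Set.contains (PySem.Dict.getD adj u PySem.Set.empty) v)) (r :: rest)) := by
            rintro x y ⟨hx, hy, hs⟩
            rw [PySem.Set.mem_diff]
            refine ⟨hy, fun hyS => ?_⟩
            have h2 := (List.mem_filter.mp hyS).2
            rw [Bool.not_eq_true', List.any_eq_false] at h2
            have h3 := h2 x hx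
            rw [pv_contains] at h3
            exact h3 (by simpa using hs)
          obtain ⟨c, hc⟩ := pv_cycle_target hv
          have hres := pv_restrict hp hv (hp c v hc)
          refine hno ⟨v, hres.mono ?_⟩
          rintro a b ⟨hab, ha, hb⟩
          exact ⟨ha, hb, hab.2.2⟩
        · intro hno ⟨v, hv⟩
          refine hno ⟨v, hv.mono ?_⟩
          rintro a b ⟨ha, hb, hab⟩
          exact ⟨hsub a ha, hsub b hb, hab⟩

theorem pvB_cycle (adj : PySem.Dict String (PySem.Set String)) (nids : List String)
    (hnd : nids.Nodup) (hclosed : ∀ a b, pvStep adj a b → a ∈ nids ∧ b ∈ nids) :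
    pvPeel adj (nids.length + 1) nids = true ↔
      ∀ v, ¬ Relation.TransGen (pvStep adj) v v := by
  rw [pvPeel_iff adj (nids.length + 1) nids hnd (by omega)]
  constructor
  · intro h v hcyc
    obtain ⟨c, hc⟩ := pv_cycle_target hcyc
    have hvn : v ∈ nids := (hclosed c v hc).2
    have hres := pv_restrict (p := fun x => x ∈ nids)
      (fun x y hxy => (hclosed x y hxy).2) hcyc hvn
    refine h ⟨v, hres.mono ?_⟩
    rintro a b ⟨hab, ha, hb⟩
    exact ⟨ha, hb, hab⟩
  · rintro h ⟨v, hv⟩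
    exact h v (hv.mono fun a b hab => hab.2.2)

theorem pvIso_any (adj : PySem.Dict String (PySem.Set String)) (l : List String) :
    pvIsoLoop adj l = true ↔ ∃ v ∈ l,
      (PySem.Dict.getD adj v PySem.Set.empty).isEmpty = true ∧
      ((PySem.Dict.values adj).any (fun s => PySem.Set.contains s v)) = false := by
  induction l with
  | nil => simp [pvIsoLoop]
  | cons v rest ih =>
    simp only [pvIsoLoop]
    by_cases h : ((PySem.Dict.getD adj v PySem.Set.empty).isEmpty &&
        !((PySem.Dict.values adj).any fun s => PySem.Set.contains s v)) = true
    · rw [if_pos h]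
      rw [Bool.and_eq_true, Bool.not_eq_true'] at h
      exact ⟨fun _ => ⟨v, by simp, h.1, h.2⟩, fun _ => rfl⟩
    · rw [if_neg h, ih]
      constructor
      · rintro ⟨w, hw, h1, h2⟩
        exact ⟨w, by simp [hw], h1, h2⟩
      · rintro ⟨w, hw, h1, h2⟩
        rcases List.mem_cons.mp hw with rfl | hw2
        · exact absurd (by rw [Bool.and_eq_true, Bool.not_eq_true']; exact ⟨h1, h2⟩) h
        · exact ⟨w, hw2, h1, h2⟩

theorem pvNonIso_mem (items : List (String × PySem.Set String)) (acc : PySem.Set String) (v : String) :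
    v ∈ items.foldl (fun acc p =>
        if p.2.isEmpty then acc else PySem.Set.update (PySem.Set.add acc p.1) p.2) acc ↔
      v ∈ acc ∨ ∃ p ∈ items, p.2 ≠ [] ∧ (v = p.1 ∨ v ∈ p.2) := by
  induction items generalizing acc with
  | nil => simp
  | cons p rest ih =>
    simp only [List.foldl_cons]
    by_cases hp : p.2.isEmpty = true
    · rw [if_pos hp, ih]
      have hnil : p.2 = [] := List.isEmpty_iff.mp hp
      simp [hnil]
    · rw [if_neg hp, ih]
      have hne : p.2 ≠ [] := fun h => hp (List.isEmpty_iff.mpr h)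
      simp only [PySem.Set.mem_update, PySem.Set.mem_add, List.mem_cons]
      constructor
      · rintro (((h | h) | h) | ⟨q, hq, h1, h2⟩)
        · exact Or.inl h
        · exact Or.inr ⟨p, Or.inl rfl, hne, Or.inl h⟩
        · exact Or.inr ⟨p, Or.inl rfl, hne, Or.inr h⟩
        · exact Or.inr ⟨q, Or.inr hq, h1, h2⟩
      · rintro (h | ⟨q, hq | hq, h1, h2⟩)
        · exact Or.inl (Or.inl (Or.inl h))
        · rcases h2 with h2 | h2
          · exact Or.inl (Or.inl (Or.inr (hq ▸ h2)))
          · exact Or.inl (Or.inr (hq ▸ h2))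
        · exact Or.inr ⟨q, hq, h1, h2⟩

theorem pvIso_equiv (adj : PySem.Dict String (PySem.Set String)) (nids : List String)
    (hkeys : PySem.Dict.keys adj = nids) (hnd : nids.Nodup) :
    pvIsoLoop adj nids = !(PySem.Set.diff nids ((PySem.Dict.items adj).foldl (fun acc p =>
      if p.2.isEmpty then acc else PySem.Set.update (PySem.Set.add acc p.1) p.2)
      PySem.Set.empty)).isEmpty := by
  have hknd : (PySem.Dict.keys adj).Nodup := hkeys ▸ hnd
  have hitems := PySem.Dict.items_eq_map_keys adj hknd PySem.Set.empty
  rw [hkeys] at hitems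
  rw [Bool.eq_iff_iff, pvIso_any, Bool.not_eq_true', List.isEmpty_eq_false_iff,
    Ne, List.eq_nil_iff_forall_not_mem]
  constructor
  · rintro ⟨v, hvn, hemp, hany⟩ hall
    apply hall v
    rw [PySem.Set.mem_diff]
    refine ⟨hvn, fun hin => ?_⟩
    rcases (pvNonIso_mem _ _ v).mp hin with h | ⟨q, hq, hqne, hvq⟩
    · cases h
    · rw [hitems] at hq
      obtain ⟨k, hk, hkq⟩ := List.mem_map.mp hq
      rcases hvq with h2 | h2
      · apply hqne
        have : q.2 = PySem.Dict.getD adj q.1 PySem.Set.empty := by rw [← hkq]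
        rw [this, ← h2]
        exact List.isEmpty_iff.mp hemp
      · rw [List.any_eq_false] at hany
        have hq2 : q.2 ∈ PySem.Dict.values adj := by
          have : PySem.Dict.values adj = (PySem.Dict.items adj).map (·.2) := rfl
          rw [this]
          exact List.mem_map.mpr ⟨q, hitems ▸ hq, rfl⟩
        have := hany q.2 hq2
        rw [pv_contains] at this
        exact absurd (by simpa using h2) (by simpa using this)
  · intro hne
    have : ∃ v, v ∈ PySem.Set.diff nids ((PySem.Dict.items adj).foldl (fun acc p =>
        if p.2.isEmpty = true then acc else PySem.Set.update (PySem.Set.add acc p.1) p.2)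
        PySem.Set.empty) := by
      by_contra hno
      rw [not_exists] at hno
      exact hne hno
    obtain ⟨v, hv⟩ := this
    rw [PySem.Set.mem_diff] at hv
    obtain ⟨hvn, hnotin⟩ := hv
    have hvitem : (v, PySem.Dict.getD adj v PySem.Set.empty) ∈ PySem.Dict.items adj := by
      rw [hitems]
      exact List.mem_map.mpr ⟨v, hvn, rfl⟩
    have hemp : PySem.Dict.getD adj v PySem.Set.empty = [] := by
      by_contra hne2
      exact hnotin ((pvNonIso_mem _ _ v).mpr
        (Or.inr ⟨(v, PySem.Dict.getD adj v PySem.Set.empty), hvitem, hne2, Or.inl rfl⟩))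
    refine ⟨v, hvn, by rw [hemp]; rfl, ?_⟩
    rw [List.any_eq_false]
    intro s hs
    have : PySem.Dict.values adj = (PySem.Dict.items adj).map (·.2) := rfl
    rw [this] at hs
    obtain ⟨q, hq, hqs⟩ := List.mem_map.mp hs
    rw [pv_contains]
    simp only [decide_eq_true_eq]
    intro hvs
    refine hnotin ((pvNonIso_mem _ _ v).mpr (Or.inr ⟨q, hq, ?_, Or.inr ?_⟩))
    · rw [hqs]
      intro h
      rw [h] at hvs
      cases hvs
    · rw [hqs]
      exact hvs

theorem pvAdj_base (nids : List String) (hnd : nids.Nodup) :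
    PySem.Dict.keys (nids.foldl (fun d v => d.insert v PySem.Set.empty)
      (PySem.Dict.empty : PySem.Dict String (PySem.Set String))) = nids ∧
    ∀ a, PySem.Dict.getD (nids.foldl (fun d v => d.insert v PySem.Set.empty)
      (PySem.Dict.empty : PySem.Dict String (PySem.Set String))) a PySem.Set.empty =
      PySem.Set.empty := by
  have hfresh := PySem.Dict.items_foldl_insert_fresh nids (fun a => a)
    (fun _ => (PySem.Set.empty : PySem.Set String)) PySem.Dict.empty
    (fun a _ => PySem.Dict.contains_empty a) (by simpa using hnd)
  have hitems : (nids.foldl (fun d v => d.insert v PySem.Set.empty)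
      (PySem.Dict.empty : PySem.Dict String (PySem.Set String))).items =
      nids.map (fun a => (a, PySem.Set.empty)) := by
    simpa [show (PySem.Dict.empty : PySem.Dict String (PySem.Set String)).items = [] from rfl]
      using hfresh
  have hkeys : PySem.Dict.keys (nids.foldl (fun d v => d.insert v PySem.Set.empty)
      (PySem.Dict.empty : PySem.Dict String (PySem.Set String))) = nids := by
    show ((nids.foldl (fun d v => d.insert v PySem.Set.empty)
      (PySem.Dict.empty : PySem.Dict String (PySem.Set String))).items.map (·.1)) = nids
    rw [hitems, List.map_map]
    simp [Function.comp_def]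
  refine ⟨hkeys, fun a => ?_⟩
  by_cases ha : a ∈ nids
  · have hmem : (a, (PySem.Set.empty : PySem.Set String)) ∈
        (nids.foldl (fun d v => d.insert v PySem.Set.empty)
          (PySem.Dict.empty : PySem.Dict String (PySem.Set String))).items := by
      rw [hitems]
      exact List.mem_map.mpr ⟨a, ha, rfl⟩
    exact PySem.Dict.getD_of_mem_items _ hmem (by rw [hkeys]; exact hnd) PySem.Set.empty
  · refine PySem.Dict.getD_of_not_contains _ _ ?_
    rw [PySem.Dict.contains_eq_decide_mem_keys, hkeys]
    simpa using ha

theorem pvAdj_fold (nids : List String) (edges : List (List (String × String))) :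
    ∀ d : PySem.Dict String (PySem.Set String), PySem.Dict.keys d = nids →
    (∀ a b, b ∈ PySem.Dict.getD d a PySem.Set.empty → b ∈ nids) →
    PySem.Dict.keys (edges.foldl (fun d edge =>
      let source := PySem.Dict.getD (PySem.Dict.mk edge) "source" ""
      let target := PySem.Dict.getD (PySem.Dict.mk edge) "target" ""
      if PySem.Set.contains nids source && PySem.Set.contains nids target then
        d.modify source PySem.Set.empty (fun s => PySem.Set.add s target)
      else d) d) = nids ∧
    (∀ a b, b ∈ PySem.Dict.getD (edges.foldl (fun d edge =>
      let source := PySem.Dict.getD (PySem.Dict.mk edge) "source" ""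
      let target := PySem.Dict.getD (PySem.Dict.mk edge) "target" ""
      if PySem.Set.contains nids source && PySem.Set.contains nids target then
        d.modify source PySem.Set.empty (fun s => PySem.Set.add s target)
      else d) d) a PySem.Set.empty → b ∈ nids) := by
  induction edges with
  | nil => exact fun d h1 h2 => ⟨h1, h2⟩
  | cons e rest ih =>
    intro d h1 h2
    simp only [List.foldl_cons]
    by_cases hcond : (PySem.Set.contains nids (PySem.Dict.getD (PySem.Dict.mk e) "source" "") &&
        PySem.Set.contains nids (PySem.Dict.getD (PySem.Dict.mk e) "target" "")) = true
    · rw [Bool.and_eq_true, pv_contains, pv_contains, decide_eq_true_eq, decide_eq_true_eq] at hcond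
      obtain ⟨hs, ht⟩ := hcond
      apply ih
      · show PySem.Dict.keys (if PySem.Set.contains nids (PySem.Dict.getD (PySem.Dict.mk e) "source" "") &&
            PySem.Set.contains nids (PySem.Dict.getD (PySem.Dict.mk e) "target" "") then
            d.modify (PySem.Dict.getD (PySem.Dict.mk e) "source" "") PySem.Set.empty
              (fun s => PySem.Set.add s (PySem.Dict.getD (PySem.Dict.mk e) "target" ""))
          else d) = nids
        rw [if_pos (by rw [Bool.and_eq_true, pv_contains, pv_contains]; simp [hs, ht])]
        rw [PySem.Dict.keys_modify, PySem.Dict.keys_insert_of_contains]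
        · exact h1
        · rw [PySem.Dict.contains_eq_decide_mem_keys, h1]
          simpa using hs
      · intro a b hb
        rw [show (if PySem.Set.contains nids (PySem.Dict.getD (PySem.Dict.mk e) "source" "") &&
            PySem.Set.contains nids (PySem.Dict.getD (PySem.Dict.mk e) "target" "") then
            d.modify (PySem.Dict.getD (PySem.Dict.mk e) "source" "") PySem.Set.empty
              (fun s => PySem.Set.add s (PySem.Dict.getD (PySem.Dict.mk e) "target" ""))
          else d) = d.modify (PySem.Dict.getD (PySem.Dict.mk e) "source" "") PySem.Set.empty
              (fun s => PySem.Set.add s (PySem.Dict.getD (PySem.Dict.mk e) "target" "")) from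
          if_pos (by rw [Bool.and_eq_true, pv_contains, pv_contains]; simp [hs, ht])] at hb
        rw [PySem.Dict.getD_modify] at hb
        split at hb
        · rcases (PySem.Set.mem_add _ _ b).mp hb with ha2 | hb2
          · exact h2 _ b ha2
          · exact hb2 ▸ ht
        · exact h2 a b hb
    · rw [show (if PySem.Set.contains nids (PySem.Dict.getD (PySem.Dict.mk e) "source" "") &&
          PySem.Set.contains nids (PySem.Dict.getD (PySem.Dict.mk e) "target" "") then
          d.modify (PySem.Dict.getD (PySem.Dict.mk e) "source" "") PySem.Set.empty
            (fun s => PySem.Set.add s (PySem.Dict.getD (PySem.Dict.mk e) "target" ""))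
        else d) = d from if_neg hcond]
      exact ih d h1 h2

theorem pvClosed (adj : PySem.Dict String (PySem.Set String)) (nids : List String)
    (hkeys : PySem.Dict.keys adj = nids)
    (hval : ∀ a b, b ∈ PySem.Dict.getD adj a PySem.Set.empty → b ∈ nids) :
    ∀ a b, pvStep adj a b → a ∈ nids ∧ b ∈ nids := by
  intro a b hstep
  refine ⟨?_, hval a b hstep⟩
  by_contra ha
  have hc : PySem.Dict.contains adj a = false := by
    rw [PySem.Dict.contains_eq_decide_mem_keys, hkeys]
    simpa using ha
  rw [pvStep, PySem.Dict.getD_of_not_contains adj PySem.Set.empty hc] at hstep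
  cases hstep

theorem pv_core (nids : PySem.Set String) (adj : PySem.Dict String (PySem.Set String))
    (hnd : nids.Nodup) (hkeys : PySem.Dict.keys adj = nids)
    (hval : ∀ a b, b ∈ PySem.Dict.getD adj a PySem.Set.empty → b ∈ nids) :
    (if pvIsoLoop adj nids then false
      else pvCycleLoop adj (nids.length + 1) nids PySem.Set.empty) =
    (if !(PySem.Set.diff nids ((PySem.Dict.items adj).foldl (fun acc p =>
        if p.2.isEmpty then acc else PySem.Set.update (PySem.Set.add acc p.1) p.2)
        PySem.Set.empty)).isEmpty then false
      else pvPeel adj (nids.length + 1) nids) := by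
  have hclosed := pvClosed adj nids hkeys hval
  rw [pvIso_equiv adj nids hkeys hnd,
    Bool.eq_iff_iff.mpr ((pvA_cycle adj nids hclosed).trans
      (pvB_cycle adj nids hnd hclosed).symm)]

-- ===== VERDICT (by name: the statement is the Claim_ definition above) =====
theorem validate_connectivity_py_spec : Claim_equal_validate_connectivity_py := by
  intro graph _
  show validate_connectivity_py graph = validate_connectivity_py_alt graph
  have hnd : (PySem.Set.ofList ((PySem.Dict.getD (PySem.Dict.mk graph) "nodes" []).map
      (fun node => PySem.Dict.getD (PySem.Dict.mk node) "id" ""))).Nodup :=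
    PySem.Set.nodup_ofList _
  have hbase := pvAdj_base (PySem.Set.ofList ((PySem.Dict.getD (PySem.Dict.mk graph) "nodes" []).map
      (fun node => PySem.Dict.getD (PySem.Dict.mk node) "id" ""))) hnd
  have hfold := pvAdj_fold (PySem.Set.ofList ((PySem.Dict.getD (PySem.Dict.mk graph) "nodes" []).map
      (fun node => PySem.Dict.getD (PySem.Dict.mk node) "id" "")))
    (PySem.Dict.getD (PySem.Dict.mk graph) "edges" [])
    ((PySem.Set.ofList ((PySem.Dict.getD (PySem.Dict.mk graph) "nodes" []).map
      (fun node => PySem.Dict.getD (PySem.Dict.mk node) "id" ""))).foldl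
        (fun d v => d.insert v PySem.Set.empty) PySem.Dict.empty)
    hbase.1 (fun a b hb => by rw [hbase.2 a] at hb; cases hb)
  exact pv_core _ _ hnd hfold.1 hfold.2
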